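-- pv_equiv track=rewrite | github.com/jshiohaha/apriori-algorithm-implementation | src/fileUtils.py | prepend_column_name_to_data
-- ===== SOURCE A (Python) =====
-- def prepend_column_name_to_data(header_arr, file_data):
--     """ Prepends the column name to each instance of the data
--         such that any columns with the same classes will be
--         discernible from each other.
--
--         @Input: header_arr, file_data
--         @Return: result_array, data_to_integer, integer_to_data
--     """
--     result_array = []
--     data_to_integer = {}
--     integer_to_data = {}
--     idx = 1
--
--     for row in file_data:
--         arr = row.split(',')
--
--         temp_arr = []
--         for i, element in enumerate(arr):
--             if element == 'NULL':
--                 temp_arr.append(-1)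
--                 continue
--             else:
--                 newElement = header_arr[i] + '=' + element
--                 temp_arr.append(newElement)
--
--             if newElement not in data_to_integer:
--                 data_to_integer[newElement] = idx
--                 integer_to_data[str(idx)] = newElement
--                 idx += 1
--
--         new_line = ','.join(map(str,temp_arr))
--         result_array.append(new_line)
--     return result_array, data_to_integer, integer_to_data
-- ===== SOURCE B (Python) =====
-- def prepend_column_name_to_data(header_arr, file_data):
--     """Pipeline rewrite without the counter/seen-set mechanism: transform rows
--     to token lists, render the lines, then get the distinct tokens in first
--     occurrence order via dict.fromkeys and build both maps by enumeration."""
--     token_rows = [[-1 if e == 'NULL' else header_arr[i] + '=' + e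
--                    for i, e in enumerate(row.split(','))]
--                   for row in file_data]
--     result_array = [','.join(map(str, ts)) for ts in token_rows]
--     ordered = list(dict.fromkeys(t for ts in token_rows for t in ts if t != -1))
--     data_to_integer = {t: i for i, t in enumerate(ordered, 1)}
--     integer_to_data = {str(i): t for i, t in enumerate(ordered, 1)}
--     return result_array, data_to_integer, integer_to_data
-- ===== Notes on version B (the rewrite author's own statement) =====
-- stated objective: alternative
-- what changed: A interleaves everything in one nested loop, testing membership and bumping an idx counter per cell to grow both dicts; B has no counter and no membership test at all: it renders the lines from precomputed token rows, deduplicates the flattened token stream with dict.fromkeys, and builds both maps as comprehensions over enumerate(ordered, 1).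
import Mathlib
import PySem

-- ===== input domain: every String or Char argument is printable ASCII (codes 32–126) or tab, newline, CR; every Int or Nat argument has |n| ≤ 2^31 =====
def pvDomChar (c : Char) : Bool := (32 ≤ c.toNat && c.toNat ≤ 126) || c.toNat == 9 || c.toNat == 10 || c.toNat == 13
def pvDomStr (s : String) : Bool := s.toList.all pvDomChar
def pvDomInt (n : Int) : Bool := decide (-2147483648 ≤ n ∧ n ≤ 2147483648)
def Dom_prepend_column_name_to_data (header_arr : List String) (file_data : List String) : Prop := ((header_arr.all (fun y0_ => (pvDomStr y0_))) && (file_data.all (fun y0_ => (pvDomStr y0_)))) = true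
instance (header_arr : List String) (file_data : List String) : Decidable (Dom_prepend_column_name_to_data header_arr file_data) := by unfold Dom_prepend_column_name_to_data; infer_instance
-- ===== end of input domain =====

-- B replaces A's interleaved membership-test/idx-counter loop by a dedup-then-enumerate pipeline; return values proved equal.

-- row.split(',') — exact: PySem.Chars.splitOn is str.split with a nonempty separator
def pvSplit (row : String) : List String :=
  (PySem.Chars.splitOn row.toList ",".toList).map String.ofList

-- Token representation shared by both ports: Python's int -1 marker is `none`,
-- a string token is `some s`; str(t) on a token is pvTokStr (str(-1) = "-1").
def pvTokStr (t : Option String) : String :=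
  match t with
  | none => "-1"
  | some s => s

-- ===== PORT A =====
-- A's inner loop body (state: temp_arr, data_to_integer, integer_to_data, idx; p = (i, element))
def pvAInner (header_arr : List String)
    (s : List (Option String) × PySem.Dict String Int × PySem.Dict String String × Int)
    (p : Int × String) :
    List (Option String) × PySem.Dict String Int × PySem.Dict String String × Int :=
  if p.2 = "NULL" then
    (s.1 ++ [none], s.2.1, s.2.2.1, s.2.2.2)
  else
    -- header_arr[i]: in range under Pre_ (Python raises IndexError otherwise)
    let newElement := PySem.List.pyGetD header_arr p.1 "" ++ "=" ++ p.2
    if s.2.1.contains newElement then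
      (s.1 ++ [some newElement], s.2.1, s.2.2.1, s.2.2.2)
    else
      (s.1 ++ [some newElement], s.2.1.insert newElement s.2.2.2,
       s.2.2.1.insert (PySem.Int.toStr s.2.2.2) newElement, s.2.2.2 + 1)

-- A's outer loop body (state: result_array, data_to_integer, integer_to_data, idx)
def pvAOuter (header_arr : List String)
    (st : List String × PySem.Dict String Int × PySem.Dict String String × Int)
    (row : String) :
    List String × PySem.Dict String Int × PySem.Dict String String × Int :=
  let inner := (PySem.List.enumerate (pvSplit row) 0).foldl (pvAInner header_arr)
      ([], st.2.1, st.2.2.1, st.2.2.2)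
  (st.1 ++ [PySem.Str.join "," (inner.1.map pvTokStr)], inner.2.1, inner.2.2.1, inner.2.2.2)

def prepend_column_name_to_data (header_arr : List String) (file_data : List String) :
    List String × (List (String × Int)) × (List (String × String)) :=
  let st := file_data.foldl (pvAOuter header_arr)
      ([], PySem.Dict.empty, PySem.Dict.empty, 1)
  (st.1, (st.2.1).items, (st.2.2.1).items)

-- ===== PORT B =====
-- one cell: NULL -> none (the -1 marker), else header_arr[i]+'='+element
def pvTok (header_arr : List String) (p : Int × String) : Option String :=
  if p.2 = "NULL" then none
  else some (PySem.List.pyGetD header_arr p.1 "" ++ "=" ++ p.2)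

def pvTokenRow (header_arr : List String) (row : String) : List (Option String) :=
  (PySem.List.enumerate (pvSplit row) 0).map (pvTok header_arr)

def prepend_column_name_to_data_alt (header_arr : List String) (file_data : List String) :
    List String × (List (String × Int)) × (List (String × String)) :=
  let token_rows := file_data.map (pvTokenRow header_arr)
  let result_array := token_rows.map (fun ts => PySem.Str.join "," (ts.map pvTokStr))
  -- dict.fromkeys over the flattened token stream with the -1 markers filtered out
  let ordered := PySem.List.dedup ((token_rows.flatMap (fun ts => ts)).filterMap (fun t => t))
  let pairs := PySem.List.enumerate ordered 1
  let data_to_integer := pairs.foldl (fun d p => d.insert p.2 p.1)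
      (PySem.Dict.empty : PySem.Dict String Int)
  let integer_to_data := pairs.foldl (fun d p => d.insert (PySem.Int.toStr p.1) p.2)
      (PySem.Dict.empty : PySem.Dict String String)
  (result_array, data_to_integer.items, integer_to_data.items)

-- ===== PRECONDITION & SPEC =====
-- Pre_ excludes exactly the inputs where Python A raises IndexError: a row with a non-NULL
-- cell whose column index is beyond the end of header_arr.
def Pre_prepend_column_name_to_data (header_arr : List String) (file_data : List String) : Prop :=
  ∀ row ∈ file_data, ∀ p ∈ PySem.List.enumerate (pvSplit row) 0,
    p.2 ≠ "NULL" → p.1 < (header_arr.length : Int)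
instance (header_arr : List String) (file_data : List String) : Decidable (Pre_prepend_column_name_to_data header_arr file_data) := by unfold Pre_prepend_column_name_to_data; infer_instance

def pvWitness_prepend_column_name_to_data : List String × List String :=
  (["a", "b"], ["1,NULL", "NULL,2", "1,2"])

def Spec_prepend_column_name_to_data (header_arr : List String) (file_data : List String) (out : List String × (List (String × Int)) × (List (String × String))) : Prop := out = prepend_column_name_to_data_alt header_arr file_data
instance (header_arr : List String) (file_data : List String) (out : List String × (List (String × Int)) × (List (String × String))) : Decidable (Spec_prepend_column_name_to_data header_arr file_data out) := by unfold Spec_prepend_column_name_to_data; infer_instance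

-- ===== CLAIM =====
def Claim_equal_prepend_column_name_to_data : Prop := ∀ (header_arr : List String) (file_data : List String), Dom_prepend_column_name_to_data header_arr file_data → Pre_prepend_column_name_to_data header_arr file_data → Spec_prepend_column_name_to_data header_arr file_data (prepend_column_name_to_data header_arr file_data)

-- ===== LEMMAS AND PROOFS =====

-- proof-only abstraction of A's per-token dict update (no temp_arr)
def pvStep (st : PySem.Dict String Int × PySem.Dict String String × Int) (t : Option String) :
    PySem.Dict String Int × PySem.Dict String String × Int :=
  match t with
  | none => st
  | some s =>
    if st.1.contains s then st
    else (st.1.insert s st.2.2, st.2.1.insert (PySem.Int.toStr st.2.2) s, st.2.2 + 1)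

-- the dict state determined by the ordered list L of tokens assigned so far
def pvD2I (L : List String) : PySem.Dict String Int :=
  (PySem.List.enumerate L 1).foldl (fun d p => d.insert p.2 p.1) PySem.Dict.empty
def pvI2D (L : List String) : PySem.Dict String String :=
  (PySem.List.enumerate L 1).foldl (fun d p => d.insert (PySem.Int.toStr p.1) p.2) PySem.Dict.empty
def pvState (L : List String) : PySem.Dict String Int × PySem.Dict String String × Int :=
  (pvD2I L, pvI2D L, 1 + L.length)

theorem pvContains_d2i (L : List String) (s : String) :
    (pvD2I L).contains s = decide (s ∈ L) := by
  unfold pvD2I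
  rw [PySem.Dict.contains_eq_decide_mem_keys,
    PySem.Dict.keys_foldl_insert_key (key := fun p : Int × String => p.2)
      (f := fun (d : PySem.Dict String Int) (p : Int × String) => p.1)]
  simp [PySem.List.map_snd_enumerate, PySem.Set.update, PySem.Dict.keys_empty,
    ← PySem.Set.ofList_eq_foldl, PySem.Set.mem_ofList]

theorem pvD2I_append (L : List String) (s : String) :
    pvD2I (L ++ [s]) = (pvD2I L).insert s (1 + (L.length : Int)) := by
  unfold pvD2I
  rw [PySem.List.enumerate_append, List.foldl_append]
  simp [PySem.List.enumerate]

theorem pvI2D_append (L : List String) (s : String) :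
    pvI2D (L ++ [s]) = (pvI2D L).insert (PySem.Int.toStr (1 + (L.length : Int))) s := by
  unfold pvI2D
  rw [PySem.List.enumerate_append, List.foldl_append]
  simp [PySem.List.enumerate]

-- A's interleaved assignment loop = dedup-relative state: folding pvStep extends L
-- by exactly the unseen string tokens, in order
theorem pvStep_state (ts : List (Option String)) (L : List String) :
    ts.foldl pvStep (pvState L) = pvState (PySem.Set.update L (ts.filterMap (fun t => t))) := by
  induction ts generalizing L with
  | nil => simp [PySem.Set.update]
  | cons t ts ih =>
    cases t with
    | none => simpa [pvStep] using ih L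
    | some s =>
      by_cases hs : s ∈ L
      · have hc : (pvD2I L).contains s = true := by simp [pvContains_d2i, hs]
        have : PySem.Set.add L s = L := by simp [PySem.Set.add, PySem.Set.contains, hs]
        simpa [pvStep, pvState, hc, PySem.Set.update, this] using ih L
      · have hc : (pvD2I L).contains s = false := by simp [pvContains_d2i, hs]
        have hadd : PySem.Set.add L s = L ++ [s] := by
          simp [PySem.Set.add, PySem.Set.contains, hs]
        have hstep : pvStep (pvState L) (some s) = pvState (L ++ [s]) := by
          simp [pvStep, pvState, hc, pvD2I_append, pvI2D_append]
          omega
        rw [List.foldl_cons, hstep]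
        simpa [PySem.Set.update, hadd] using ih (L ++ [s])

-- A's inner loop = (append the token-row, fold pvStep over it)
theorem pvInner_eq (header_arr : List String) (l : List (Int × String))
    (temp : List (Option String)) (d : PySem.Dict String Int × PySem.Dict String String × Int) :
    l.foldl (pvAInner header_arr) (temp, d) =
      (temp ++ l.map (pvTok header_arr), (l.map (pvTok header_arr)).foldl pvStep d) := by
  induction l generalizing temp d with
  | nil => simp
  | cons p l ih =>
    obtain ⟨d1, d2, idx⟩ := d
    by_cases hn : p.2 = "NULL"
    · simp [pvAInner, pvStep, pvTok, hn, ih]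
    · by_cases hc : d1.contains (PySem.List.pyGetD header_arr p.1 "" ++ "=" ++ p.2)
      · simp [pvAInner, pvStep, pvTok, hn, hc, ih]
      · simp [pvAInner, pvStep, pvTok, hn, hc, ih]

-- A's outer loop = (append the rendered lines, fold pvStep row by row)
theorem pvOuter_eq (header_arr : List String) (fd : List String)
    (res : List String) (d : PySem.Dict String Int × PySem.Dict String String × Int) :
    fd.foldl (pvAOuter header_arr) (res, d) =
      (res ++ fd.map (fun row => PySem.Str.join "," ((pvTokenRow header_arr row).map pvTokStr)),
       (fd.map (pvTokenRow header_arr)).foldl (fun st ts => ts.foldl pvStep st) d) := by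
  induction fd generalizing res d with
  | nil => simp
  | cons row fd ih =>
    obtain ⟨d1, d2, idx⟩ := d
    simp only [List.foldl_cons, List.map_cons]
    rw [show pvAOuter header_arr (res, d1, d2, idx) row =
        (res ++ [PySem.Str.join "," ((pvTokenRow header_arr row).map pvTokStr)],
         (pvTokenRow header_arr row).foldl pvStep (d1, d2, idx)) from ?_, ih]
    · simp
    · simp [pvAOuter, pvInner_eq, pvTokenRow]

-- ===== VERDICT =====
theorem prepend_column_name_to_data_spec : Claim_equal_prepend_column_name_to_data := by
  intro header_arr file_data _ _
  unfold Spec_prepend_column_name_to_data prepend_column_name_to_data prepend_column_name_to_data_alt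
  rw [pvOuter_eq]
  have hflat : (file_data.map (pvTokenRow header_arr)).foldl (fun st ts => ts.foldl pvStep st)
        (PySem.Dict.empty, PySem.Dict.empty, 1)
      = ((file_data.map (pvTokenRow header_arr)).flatMap (fun ts => ts)).foldl pvStep
        (PySem.Dict.empty, PySem.Dict.empty, 1) := by
    simp [List.flatMap_def, List.foldl_flatten, List.foldl_map]
  have hinit : (PySem.Dict.empty (κ := String) (ν := Int),
      PySem.Dict.empty (κ := String) (ν := String), (1 : Int)) = pvState [] := rfl
  rw [hflat, hinit, pvStep_state]
  have hord : PySem.Set.update ([] : List String)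
        (((file_data.map (pvTokenRow header_arr)).flatMap (fun ts => ts)).filterMap (fun t => t))
      = PySem.List.dedup
        (((file_data.map (pvTokenRow header_arr)).flatMap (fun ts => ts)).filterMap (fun t => t)) := by
    simp [PySem.List.dedup_eq_ofList, PySem.Set.ofList_eq_foldl, PySem.Set.update]
  rw [hord]
  simp [pvState, pvD2I, pvI2D]
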